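-- pv_equiv track=rewrite | github.com/ff66ccff/BigProject_WNS | scripts/preprocess_pdb.py | _normalize_chain_ids
-- ===== SOURCE A (Python) =====
-- from typing import Iterable, List, Set, Tuple
--
-- CHAIN_IDS = list("ABCDEFGHIJKLMNOPQRSTUVWXYZ0123456789")
--
-- def _normalize_chain_ids(lines: Iterable[str]) -> List[str]:
--     chain_iterator = (cid for cid in CHAIN_IDS)
--     chain_map = {}
--     normalized_lines: List[str] = []
--     for line in lines:
--         if line.startswith(("ATOM", "HETATM")) and len(line) >= 22:
--             chain_id = line[21].strip() or ""
--             residue_key = line[17:27]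
--             if chain_id == "":
--                 if residue_key not in chain_map:
--                     try:
--                         chain_map[residue_key] = next(chain_iterator)
--                     except StopIteration:
--                         raise RuntimeError(
--                             "Ran out of chain identifiers while normalizing unnamed chains."
--                         )
--                 chain_id = chain_map[residue_key]
--             normalized_line = line[:21] + chain_id + line[22:]
--             normalized_lines.append(normalized_line)
--         else:
--             normalized_lines.append(line)
--     return normalized_lines
-- ===== SOURCE B (Python) =====
-- from typing import Iterable, List
--
-- CHAIN_IDS = list("ABCDEFGHIJKLMNOPQRSTUVWXYZ0123456789")
--
-- def _needs_chain(line: str) -> bool: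
--     return (line.startswith(("ATOM", "HETATM"))
--             and len(line) >= 22
--             and line[21].strip() == "")
--
-- def _normalize_chain_ids(lines: Iterable[str]) -> List[str]:
--     lines = list(lines)  # materialize: the input may be a one-shot iterable
--     chain_map = {}
--     next_idx = 0
--     for line in lines:
--         if _needs_chain(line):
--             residue_key = line[17:27]
--             if residue_key not in chain_map:
--                 if next_idx >= len(CHAIN_IDS):
--                     raise RuntimeError(
--                         "Ran out of chain identifiers while normalizing unnamed chains."
--                     )
--                 chain_map[residue_key] = CHAIN_IDS[next_idx]
--                 next_idx += 1
--     return [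
--         line[:21] + chain_map[line[17:27]] + line[22:] if _needs_chain(line) else line
--         for line in lines
--     ]
-- ===== Notes on version B (the rewrite author's own statement) =====
-- stated objective: alternative
-- what changed: Replaced A's single lazy pass (assigning chain IDs while emitting) by a two-phase design: a first pass that only builds the residue-key -> chain-ID map with an explicit index into CHAIN_IDS, then a comprehension that rewrites every qualifying line from the finished map; the input is materialized up front so one-shot iterables still work.
import Mathlib
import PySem

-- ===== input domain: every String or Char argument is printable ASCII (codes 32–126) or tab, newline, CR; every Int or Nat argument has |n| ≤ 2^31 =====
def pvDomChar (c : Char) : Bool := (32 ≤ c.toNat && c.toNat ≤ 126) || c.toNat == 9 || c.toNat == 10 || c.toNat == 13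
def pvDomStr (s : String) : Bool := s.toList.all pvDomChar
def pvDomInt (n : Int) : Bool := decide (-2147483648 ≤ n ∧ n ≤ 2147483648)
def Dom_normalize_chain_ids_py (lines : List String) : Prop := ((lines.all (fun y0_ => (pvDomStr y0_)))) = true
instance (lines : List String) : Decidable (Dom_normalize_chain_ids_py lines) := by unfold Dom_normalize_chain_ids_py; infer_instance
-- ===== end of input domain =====

-- B replaces A's single lazy pass (assign-while-emitting) by a two-phase design — build the
-- residue-key→chain-ID map first, then rewrite all lines from the finished map — an alternative
-- decomposition of the same cost. (A's Python materializes nothing; B materializes the iterable;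
-- return values agree.)


-- CHAIN_IDS = list("ABCDEFGHIJKLMNOPQRSTUVWXYZ0123456789")  (each id is a one-char string = List Char of length 1 here)
def pvCHAIN : List Char := "ABCDEFGHIJKLMNOPQRSTUVWXYZ0123456789".toList

-- ===== PORT A =====
-- line[21].strip() (in the branch where len(line) ≥ 22 the index always exists)
def pvChainField (l : List Char) : List Char :=
  PySem.Chars.strip (((PySem.List.pyGet? l 21).map (fun c => [c])).getD [])

-- A's loop: state = (chain_map, iterator position); `none` = the RuntimeError path (excluded by Pre_)
def pvLoopA : List (List Char) → PySem.Dict (List Char) (List Char) → Nat → Option (List (List Char))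
  | [], _, _ => some []
  | l :: ls, m, i =>
    if (PySem.Chars.startswith l "ATOM".toList || PySem.Chars.startswith l "HETATM".toList)
        && decide (22 ≤ l.length) then
      let cid := pvChainField l
      let key := PySem.List.slice l (some 17) (some 27)
      if cid = [] then
        match m.get? key with
        | some c =>
          (pvLoopA ls m i).map
            ((PySem.List.slice l none (some 21) ++ c ++ PySem.List.slice l (some 22) none) :: ·)
        | none =>
          match pvCHAIN[i]? with
          | some ch =>
            (pvLoopA ls (m.insert key [ch]) (i + 1)).map
              ((PySem.List.slice l none (some 21) ++ [ch] ++ PySem.List.slice l (some 22) none) :: ·)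
          | none => none
      else
        (pvLoopA ls m i).map
          ((PySem.List.slice l none (some 21) ++ cid ++ PySem.List.slice l (some 22) none) :: ·)
    else
      (pvLoopA ls m i).map (l :: ·)

def normalize_chain_ids_py (lines : List String) : List String :=
  ((pvLoopA (lines.map String.toList) PySem.Dict.empty 0).getD []).map String.ofList

-- ===== PORT B =====
-- _needs_chain(line)
def pvNeeds (l : List Char) : Bool :=
  (PySem.Chars.startswith l "ATOM".toList || PySem.Chars.startswith l "HETATM".toList)
    && decide (22 ≤ l.length) && decide (pvChainField l = [])

def pvKey (l : List Char) : List Char := PySem.List.slice l (some 17) (some 27)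

-- B's first pass: build the full chain map; `none` = the RuntimeError path (excluded by Pre_)
def pvBuild : List (List Char) → PySem.Dict (List Char) (List Char) → Nat →
    Option (PySem.Dict (List Char) (List Char))
  | [], m, _ => some m
  | l :: ls, m, i =>
    if pvNeeds l then
      if m.contains (pvKey l) then pvBuild ls m i
      else
        match pvCHAIN[i]? with
        | some ch => pvBuild ls (m.insert (pvKey l) [ch]) (i + 1)
        | none => none
    else pvBuild ls m i

def normalize_chain_ids_py_alt (lines : List String) : List String :=
  match pvBuild (lines.map String.toList) PySem.Dict.empty 0 with
  | none => []
  | some m =>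
    lines.map (fun s =>
      let l := s.toList
      if pvNeeds l then
        String.ofList
          (PySem.List.slice l none (some 21) ++ m.getD (pvKey l) [] ++ PySem.List.slice l (some 22) none)
      else s)

-- ===== PRECONDITION & SPEC =====
-- Pre_ excludes exactly the inputs with more than 36 distinct residue keys among unnamed-chain
-- ATOM/HETATM lines: there Python A raises RuntimeError (and B raises it too).
def Pre_normalize_chain_ids_py (lines : List String) : Prop :=
  (PySem.List.dedup (((lines.map String.toList).filter pvNeeds).map pvKey)).length ≤ 36
instance (lines : List String) : Decidable (Pre_normalize_chain_ids_py lines) := by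
  unfold Pre_normalize_chain_ids_py; infer_instance

def pvWitness_normalize_chain_ids_py : List String :=
  ["ATOM      1  N   ALA       1      11.104", "REMARK 350"]

def Spec_normalize_chain_ids_py (lines : List String) (out : List String) : Prop :=
  out = normalize_chain_ids_py_alt lines
instance (lines : List String) (out : List String) : Decidable (Spec_normalize_chain_ids_py lines out) := by
  unfold Spec_normalize_chain_ids_py; infer_instance

-- ===== CLAIM (what is proved, stated in full; the proofs are below) =====
def Claim_equal_normalize_chain_ids_py : Prop :=
  ∀ (lines : List String), Dom_normalize_chain_ids_py lines →
    Pre_normalize_chain_ids_py lines →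
      Spec_normalize_chain_ids_py lines (normalize_chain_ids_py lines)

-- ===== LEMMAS AND PROOFS =====

-- the final map extends any intermediate map (keys are never overwritten)
theorem pvBuild_mono (ls : List (List Char)) (m M : PySem.Dict (List Char) (List Char)) (i : Nat)
    (h : pvBuild ls m i = some M) {k c} (hk : m.get? k = some c) : M.get? k = some c := by
  induction ls generalizing m i with
  | nil => simp [pvBuild] at h; rw [← h]; exact hk
  | cons l ls ih =>
    simp only [pvBuild] at h
    by_cases hn : pvNeeds l
    · simp only [hn, if_pos] at h
      by_cases hc : m.contains (pvKey l)
      · rw [if_pos hc] at h; exact ih _ _ h hk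
      · rw [if_neg hc] at h
        cases hch : pvCHAIN[i]? with
        | none => rw [hch] at h; cases h
        | some ch =>
          rw [hch] at h
          refine ih _ _ h ?_
          rw [PySem.Dict.get?_insert_of_ne]
          · exact hk
          · intro he
            rw [he] at hk
            rw [PySem.Dict.contains_eq_isSome_get?, hk] at hc
            simp at hc
    · rw [if_neg hn] at h; exact ih _ _ h hk

-- single-character strip: all or nothing
theorem pvStrip_single (c : Char) :
    PySem.Chars.strip [c] = [] ∨ PySem.Chars.strip [c] = [c] := by
  simp only [PySem.Chars.strip, PySem.Chars.lstrip, PySem.Chars.rstrip]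
  by_cases h : PySem.Chars.isspace c
  · left; simp [List.dropWhile, h]
  · right; simp [List.dropWhile, h]

-- a qualifying line with a named chain is re-emitted unchanged
theorem pvRewrite_id (l : List Char) (hlen : 22 ≤ l.length) (hne : pvChainField l ≠ []) :
    PySem.List.slice l none (some 21) ++ pvChainField l ++ PySem.List.slice l (some 22) none = l := by
  have h21 : 21 < l.length := by omega
  have hget : PySem.List.pyGet? l 21 = some l[21] := by
    simp [PySem.List.pyGet?, PySem.List.pyIdx?, h21]
  have hcf : pvChainField l = PySem.Chars.strip [l[21]] := by
    simp [pvChainField, hget]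
  have hc : pvChainField l = [l[21]] := by
    rcases pvStrip_single l[21] with h | h
    · exact absurd (hcf.trans h) hne
    · exact hcf.trans h
  rw [hc, PySem.List.slice_to l (by norm_num), PySem.List.slice_from l (by norm_num)]
  have : (21 : Int).toNat = 21 := rfl
  rw [this]
  have : (22 : Int).toNat = 22 := rfl
  rw [this]
  have htake : List.take 22 l = List.take 21 l ++ [l[21]] := by
    rw [List.take_add_one]
    simp [List.getElem?_eq_getElem h21]
  calc List.take 21 l ++ [l[21]] ++ List.drop 22 l
      = List.take 22 l ++ List.drop 22 l := by rw [htake]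
    _ = l := List.take_append_drop _ _

-- what B emits for one line, given the final map
def pvEmit (M : PySem.Dict (List Char) (List Char)) (l : List Char) : List Char :=
  if pvNeeds l then
    PySem.List.slice l none (some 21) ++ M.getD (pvKey l) [] ++ PySem.List.slice l (some 22) none
  else l

-- main invariant: A's lazy loop produces exactly B's second pass over B's finished map
theorem pvLoopA_eq_build (ls : List (List Char)) (m : PySem.Dict (List Char) (List Char)) (i : Nat) :
    pvLoopA ls m i = (pvBuild ls m i).map (fun M => ls.map (pvEmit M)) := by
  induction ls generalizing m i with
  | nil => simp [pvLoopA, pvBuild]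
  | cons l ls ih =>
    simp only [pvLoopA, pvBuild, pvKey]
    by_cases hq : ((PySem.Chars.startswith l "ATOM".toList
        || PySem.Chars.startswith l "HETATM".toList) && decide (22 ≤ l.length)) = true
    · rw [if_pos hq]
      by_cases hcid : pvChainField l = []
      · have hq' := hq
        simp only [Bool.and_eq_true, Bool.or_eq_true, decide_eq_true_eq] at hq'
        have hn : pvNeeds l = true := by
          simp [pvNeeds, hcid]
          exact ⟨hq'.1, hq'.2⟩
        rw [if_pos hcid, hn, if_pos rfl]
        cases hget : m.get? (PySem.List.slice l (some 17) (some 27)) with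
        | some c =>
          have hcont : m.contains (PySem.List.slice l (some 17) (some 27)) = true := by
            rw [PySem.Dict.contains_eq_isSome_get?, hget]; rfl
          rw [hcont, if_pos rfl]
          simp only [ih]
          cases hb : pvBuild ls m i with
          | none => rfl
          | some M =>
            have hM : M.get? (PySem.List.slice l (some 17) (some 27)) = some c :=
              pvBuild_mono ls m M i hb hget
            have hgd : M.getD (PySem.List.slice l (some 17) (some 27)) [] = c :=
              PySem.Dict.getD_of_get?_eq_some _ _ hM
            simp only [Option.map_some, List.map_cons]
            congr 1
            simp [pvEmit, hn, pvKey, hgd]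
        | none =>
          have hcont : m.contains (PySem.List.slice l (some 17) (some 27)) = false := by
            rw [PySem.Dict.contains_eq_isSome_get?, hget]; rfl
          rw [hcont]
          simp only [Bool.false_eq_true, if_false]
          cases hch : pvCHAIN[i]? with
          | none => rfl
          | some ch =>
            simp only [ih]
            cases hb : pvBuild ls (m.insert (PySem.List.slice l (some 17) (some 27)) [ch]) (i + 1) with
            | none => rfl
            | some M =>
              have hM : M.get? (PySem.List.slice l (some 17) (some 27)) = some [ch] :=
                pvBuild_mono ls _ M (i + 1) hb (PySem.Dict.get?_insert_self _ _ _)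
              have hgd : M.getD (PySem.List.slice l (some 17) (some 27)) [] = [ch] :=
                PySem.Dict.getD_of_get?_eq_some _ _ hM
              simp only [Option.map_some, List.map_cons]
              congr 1
              simp [pvEmit, hn, pvKey, hgd]
      · have hn : pvNeeds l = false := by simp [pvNeeds, hcid]
        rw [if_neg hcid, hn]
        simp only [Bool.false_eq_true, if_false, ih]
        cases hb : pvBuild ls m i with
        | none => rfl
        | some M =>
          simp only [Option.map_some, List.map_cons]
          congr 1
          have hlen : 22 ≤ l.length := by
            have h2 := hq
            simp only [Bool.and_eq_true, decide_eq_true_eq] at h2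
            exact h2.2
          rw [pvRewrite_id l hlen hcid]
          simp [pvEmit, hn]
    · rw [if_neg hq]
      have hf : ((PySem.Chars.startswith l "ATOM".toList
          || PySem.Chars.startswith l "HETATM".toList) && decide (22 ≤ l.length)) = false := by
        cases h : ((PySem.Chars.startswith l "ATOM".toList
            || PySem.Chars.startswith l "HETATM".toList) && decide (22 ≤ l.length)) with
        | true => exact absurd h hq
        | false => rfl
      have hn : pvNeeds l = false := by
        simp only [pvNeeds, hf, Bool.false_and]
      simp only [hn, Bool.false_eq_true, if_false]
      simp only [ih]
      cases hb : pvBuild ls m i with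
      | none => rfl
      | some M =>
        simp only [Option.map_some, List.map_cons]
        congr 1
        simp [pvEmit, hn]

-- ===== VERDICT (by name: the statement is the Claim_ definition above) =====
theorem normalize_chain_ids_py_spec : Claim_equal_normalize_chain_ids_py := by
  intro lines _ _
  unfold Spec_normalize_chain_ids_py normalize_chain_ids_py normalize_chain_ids_py_alt
  rw [pvLoopA_eq_build]
  cases hb : pvBuild (lines.map String.toList) PySem.Dict.empty 0 with
  | none => rfl
  | some M =>
    simp only [Option.map_some, Option.getD_some, List.map_map]
    apply List.map_congr_left
    intro s _
    by_cases hn : pvNeeds s.toList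
    · simp [pvEmit, hn]
    · simp [pvEmit, hn]
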